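-- pv_equiv track=rewrite | github.com/frederikho/tiny-rts-tools | generate_map/generate_map.py | dilate_mask
-- ===== SOURCE A (Python) =====
-- def dilate_mask(mask: list[int], width: int, height: int, min_neighbors: int) -> list[int]:
--     updated = mask[:]
--     for r in range(1, height - 1):
--         for c in range(1, width - 1):
--             idx = r * width + c
--             if mask[idx]:
--                 continue
--             neighbors = 0
--             for dr in (-1, 0, 1):
--                 for dc in (-1, 0, 1):
--                     if dr == 0 and dc == 0:
--                         continue
--                     neighbors += mask[(r + dr) * width + (c + dc)]
--             if neighbors >= min_neighbors:
--                 updated[idx] = 1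
--     return updated
-- ===== SOURCE B (Python) =====
-- def dilate_mask(mask: list[int], width: int, height: int, min_neighbors: int) -> list[int]:
--     updated = mask[:]
--     if width < 3 or height < 3:
--         return updated
--     # one pass of per-row prefix sums, so each cell's 8-neighbor count is six O(1) lookups
--     prefix = []
--     for i in range(height):
--         base = i * width
--         row = [0]
--         s = 0
--         for j in range(width):
--             s += mask[base + j]
--             row.append(s)
--         prefix.append(row)
--     for r in range(1, height - 1):
--         for c in range(1, width - 1):
--             idx = r * width + c
--             if mask[idx]:
--                 continue
--             total = (prefix[r - 1][c + 2] - prefix[r - 1][c - 1]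
--                      + prefix[r][c + 2] - prefix[r][c - 1]
--                      + prefix[r + 1][c + 2] - prefix[r + 1][c - 1])
--             if total >= min_neighbors:
--                 updated[idx] = 1
--     return updated
-- ===== Notes on version B (the rewrite author's own statement) =====
-- stated objective: faster
-- what changed: Replaces the per-cell 3x3 double offset loop with one precomputed pass of per-row prefix sums, so each interior cell's neighbor count becomes six O(1) prefix lookups (the center cell is 0 for every processed cell, so the 3-wide row windows sum exactly the 8 neighbors).
import Mathlib
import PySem

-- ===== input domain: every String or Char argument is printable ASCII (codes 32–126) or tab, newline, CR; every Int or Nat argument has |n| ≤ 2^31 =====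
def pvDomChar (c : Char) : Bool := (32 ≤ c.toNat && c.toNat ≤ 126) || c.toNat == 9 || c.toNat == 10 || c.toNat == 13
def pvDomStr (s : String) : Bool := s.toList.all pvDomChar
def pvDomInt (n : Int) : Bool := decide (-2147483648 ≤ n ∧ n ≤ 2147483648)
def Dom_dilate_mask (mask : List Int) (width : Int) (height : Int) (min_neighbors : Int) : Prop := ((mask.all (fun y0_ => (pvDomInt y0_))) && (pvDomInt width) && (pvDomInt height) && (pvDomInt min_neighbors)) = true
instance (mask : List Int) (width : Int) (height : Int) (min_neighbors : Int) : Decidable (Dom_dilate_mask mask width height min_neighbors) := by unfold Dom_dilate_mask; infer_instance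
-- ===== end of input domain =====

-- B replaces A's per-cell 3x3 offset loops by one pass of per-row prefix sums, turning each
-- neighbor count into six O(1) lookups (a constant-factor speedup; return values are identical).

-- ===== PORT A =====
def dilate_mask (mask : List Int) (width : Int) (height : Int) (min_neighbors : Int) : List Int :=
  (PySem.List.pyRange 1 (height - 1) 1).foldl (fun updated r =>
    (PySem.List.pyRange 1 (width - 1) 1).foldl (fun updated c =>
      let idx := r * width + c
      if PySem.List.pyGetD mask idx 0 ≠ 0 then updated
      else
        let neighbors := ([(-1 : Int), 0, 1]).foldl (fun n dr =>
          ([(-1 : Int), 0, 1]).foldl (fun n dc =>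
            if dr = 0 ∧ dc = 0 then n
            else n + PySem.List.pyGetD mask ((r + dr) * width + (c + dc)) 0) n) 0
        if neighbors ≥ min_neighbors then PySem.List.pySetD updated idx 1 else updated)
      updated) mask

-- ===== PORT B =====
def dilate_mask_alt (mask : List Int) (width : Int) (height : Int) (min_neighbors : Int) : List Int :=
  if width < 3 ∨ height < 3 then mask
  else
    let pref := (PySem.List.pyRange 0 height 1).foldl (fun pr i =>
      let base := i * width
      let rs := (PySem.List.pyRange 0 width 1).foldl
        (fun (p : List Int × Int) j =>
          let s := p.2 + PySem.List.pyGetD mask (base + j) 0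
          (p.1 ++ [s], s)) ([0], 0)
      pr ++ [rs.1]) []
    (PySem.List.pyRange 1 (height - 1) 1).foldl (fun updated r =>
      (PySem.List.pyRange 1 (width - 1) 1).foldl (fun updated c =>
        let idx := r * width + c
        if PySem.List.pyGetD mask idx 0 ≠ 0 then updated
        else
          let total :=
            PySem.List.pyGetD (PySem.List.pyGetD pref (r - 1) []) (c + 2) 0
            - PySem.List.pyGetD (PySem.List.pyGetD pref (r - 1) []) (c - 1) 0
            + PySem.List.pyGetD (PySem.List.pyGetD pref r []) (c + 2) 0
            - PySem.List.pyGetD (PySem.List.pyGetD pref r []) (c - 1) 0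
            + PySem.List.pyGetD (PySem.List.pyGetD pref (r + 1) []) (c + 2) 0
            - PySem.List.pyGetD (PySem.List.pyGetD pref (r + 1) []) (c - 1) 0
          if total ≥ min_neighbors then PySem.List.pySetD updated idx 1 else updated)
        updated) mask

-- ===== PRECONDITION & SPEC =====
-- Pre_ excludes exactly the inputs on which the Python A raises IndexError:
-- a real grid (width ≥ 3, height ≥ 3) whose mask list is shorter than width*height.
def Pre_dilate_mask (mask : List Int) (width : Int) (height : Int) (min_neighbors : Int) : Prop :=
  (3 ≤ width ∧ 3 ≤ height) → width * height ≤ (mask.length : Int)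
instance (mask : List Int) (width : Int) (height : Int) (min_neighbors : Int) : Decidable (Pre_dilate_mask mask width height min_neighbors) := by unfold Pre_dilate_mask; infer_instance
def pvWitness_dilate_mask : List Int × Int × Int × Int := ([0, 1, 0, 1, 0, 1, 0, 0, 0], 3, 3, 2)
def Spec_dilate_mask (mask : List Int) (width : Int) (height : Int) (min_neighbors : Int) (out : List Int) : Prop := out = dilate_mask_alt mask width height min_neighbors
instance (mask : List Int) (width : Int) (height : Int) (min_neighbors : Int) (out : List Int) : Decidable (Spec_dilate_mask mask width height min_neighbors out) := by unfold Spec_dilate_mask; infer_instance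

-- ===== CLAIM (what is proved, stated in full; the proofs are below) =====
def Claim_equal_dilate_mask : Prop := ∀ (mask : List Int) (width : Int) (height : Int) (min_neighbors : Int), Dom_dilate_mask mask width height min_neighbors → Pre_dilate_mask mask width height min_neighbors → Spec_dilate_mask mask width height min_neighbors (dilate_mask mask width height min_neighbors)

-- ===== LEMMAS AND PROOFS =====

-- partial row sums: psum mask base j = mask[base] + mask[base+1] + … + mask[base+j-1]
def psum (mask : List Int) (base : Int) : Nat → Int
  | 0 => 0
  | (j+1) => psum mask base j + PySem.List.pyGetD mask (base + (j : Int)) 0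

lemma row_spec (mask : List Int) (base : Int) (n : Nat) :
    (PySem.List.pyRange 0 (n : Int) 1).foldl
      (fun (p : List Int × Int) j =>
        let s := p.2 + PySem.List.pyGetD mask (base + j) 0
        (p.1 ++ [s], s)) ([0], 0)
    = ((List.range (n + 1)).map (fun j => psum mask base j), psum mask base n) := by
  induction n with
  | zero => simp [PySem.List.pyRange_one_eq_nil, psum]
  | succ n ih =>
    have hc : ((n + 1 : Nat) : Int) = (n : Int) + 1 := by push_cast; ring
    rw [hc, PySem.List.pyRange_one_succ_right (by positivity), List.foldl_append, ih]
    simp [List.range_succ, psum]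

lemma pref_spec (mask : List Int) (width : Int) (hw : 0 ≤ width) (h : Nat) :
    (PySem.List.pyRange 0 (h : Int) 1).foldl (fun pr i =>
      let base := i * width
      let rs := (PySem.List.pyRange 0 width 1).foldl
        (fun (p : List Int × Int) j =>
          let s := p.2 + PySem.List.pyGetD mask (base + j) 0
          (p.1 ++ [s], s)) ([0], 0)
      pr ++ [rs.1]) []
    = (List.range h).map (fun i =>
        (List.range (width.toNat + 1)).map (fun j => psum mask ((i : Int) * width) j)) := by
  induction h with
  | zero => simp [PySem.List.pyRange_one_eq_nil]
  | succ n ih =>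
    have hc : ((n + 1 : Nat) : Int) = (n : Int) + 1 := by push_cast; ring
    rw [hc, PySem.List.pyRange_one_succ_right (by positivity), List.foldl_append, ih]
    have hr := row_spec mask ((n : Int) * width) width.toNat
    rw [Int.toNat_of_nonneg hw] at hr
    simp [List.range_succ, hr]

lemma pref_spec' (mask : List Int) (width height : Int) (hw : 0 ≤ width) (hh : 0 ≤ height) :
    (PySem.List.pyRange 0 height 1).foldl (fun pr i =>
      let base := i * width
      let rs := (PySem.List.pyRange 0 width 1).foldl
        (fun (p : List Int × Int) j =>
          let s := p.2 + PySem.List.pyGetD mask (base + j) 0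
          (p.1 ++ [s], s)) ([0], 0)
      pr ++ [rs.1]) []
    = (List.range height.toNat).map (fun i =>
        (List.range (width.toNat + 1)).map (fun j => psum mask ((i : Int) * width) j)) := by
  have h := pref_spec mask width hw height.toNat
  rwa [Int.toNat_of_nonneg hh] at h

lemma pref_get (mask : List Int) (width height : Int) (i : Int) (hi0 : 0 ≤ i) (hih : i < height) :
    PySem.List.pyGetD ((List.range height.toNat).map (fun i =>
        (List.range (width.toNat + 1)).map (fun j => psum mask ((i : Int) * width) j))) i []
    = (List.range (width.toNat + 1)).map (fun j => psum mask (i * width) j) := by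
  rw [PySem.List.pyGetD_eq_getElem _ _ hi0 (by simp; omega)]
  simp
  intro a _
  congr 2
  have hm : List.flatMap (fun a : Nat => [(a : Int)]) (List.range height.toNat)
      = (List.range height.toNat).map (fun a : Nat => (a : Int)) := by
    simp [List.map_eq_flatMap]
  simp [hm, Int.toNat_of_nonneg hi0]

lemma row_get (mask : List Int) (base width : Int) (j : Int) (hj0 : 0 ≤ j) (hj : j ≤ width) :
    PySem.List.pyGetD ((List.range (width.toNat + 1)).map (fun j => psum mask base j)) j 0
    = psum mask base j.toNat := by
  rw [PySem.List.pyGetD_eq_getElem _ _ hj0 (by simp; omega)]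
  simp

lemma psum_window (mask : List Int) (base : Int) (k : Nat) :
    psum mask base (k + 3) - psum mask base k
    = PySem.List.pyGetD mask (base + (k : Int)) 0
      + PySem.List.pyGetD mask (base + (k : Int) + 1) 0
      + PySem.List.pyGetD mask (base + (k : Int) + 2) 0 := by
  show psum mask base (k + 1 + 1 + 1) - psum mask base k = _
  simp only [psum]
  push_cast
  ring

lemma triple (mask : List Int) (width a c : Int) (hc1 : 1 ≤ c) (hc2 : c < width - 1) :
    PySem.List.pyGetD ((List.range (width.toNat + 1)).map (fun j => psum mask (a * width) j)) (c + 2) 0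
    - PySem.List.pyGetD ((List.range (width.toNat + 1)).map (fun j => psum mask (a * width) j)) (c - 1) 0
    = PySem.List.pyGetD mask (a * width + (c - 1)) 0
      + PySem.List.pyGetD mask (a * width + c) 0
      + PySem.List.pyGetD mask (a * width + (c + 1)) 0 := by
  rw [row_get mask (a * width) width (c + 2) (by omega) (by omega),
      row_get mask (a * width) width (c - 1) (by omega) (by omega)]
  obtain ⟨k, hk⟩ : ∃ k : Nat, c - 1 = (k : Int) := ⟨(c - 1).toNat, by omega⟩
  have h2 : (c + 2).toNat = k + 3 := by omega
  have h1 : (c - 1).toNat = k := by omega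
  rw [h1, h2, psum_window, ← hk]
  have e1 : a * width + (c - 1) + 1 = a * width + c := by ring
  have e2 : a * width + (c - 1) + 2 = a * width + (c + 1) := by ring
  rw [e1, e2]

lemma neighA (mask : List Int) (width r c : Int) :
    ([(-1 : Int), 0, 1]).foldl (fun n dr =>
      ([(-1 : Int), 0, 1]).foldl (fun n dc =>
        if dr = 0 ∧ dc = 0 then n
        else n + PySem.List.pyGetD mask ((r + dr) * width + (c + dc)) 0) n) 0
    = PySem.List.pyGetD mask ((r - 1) * width + (c - 1)) 0
      + PySem.List.pyGetD mask ((r - 1) * width + c) 0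
      + PySem.List.pyGetD mask ((r - 1) * width + (c + 1)) 0
      + PySem.List.pyGetD mask (r * width + (c - 1)) 0
      + PySem.List.pyGetD mask (r * width + (c + 1)) 0
      + PySem.List.pyGetD mask ((r + 1) * width + (c - 1)) 0
      + PySem.List.pyGetD mask ((r + 1) * width + c) 0
      + PySem.List.pyGetD mask ((r + 1) * width + (c + 1)) 0 := by
  norm_num [List.foldl]
  ring_nf

theorem dilate_mask_spec : Claim_equal_dilate_mask := by
  intro mask width height min_neighbors _dom hpre
  unfold Spec_dilate_mask
  by_cases hdeg : width < 3 ∨ height < 3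
  · rw [dilate_mask_alt, if_pos hdeg]
    rcases hdeg with hdw | hdh
    · unfold dilate_mask
      simp [PySem.List.pyRange_one_eq_nil (show width - 1 ≤ 1 by omega)]
    · unfold dilate_mask
      simp [PySem.List.pyRange_one_eq_nil (show height - 1 ≤ 1 by omega)]
  · push_neg at hdeg
    obtain ⟨hw, hh⟩ := hdeg
    rw [dilate_mask_alt, if_neg (by omega)]
    simp only [pref_spec' mask width height (by omega) (by omega)]
    unfold dilate_mask
    apply PySem.List.foldl_congr_mem
    intro acc r hr
    rw [PySem.List.mem_pyRange_one] at hr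
    apply PySem.List.foldl_congr_mem
    intro acc2 c hc
    rw [PySem.List.mem_pyRange_one] at hc
    dsimp only
    by_cases hm : PySem.List.pyGetD mask (r * width + c) 0 ≠ 0
    · rw [if_pos hm, if_pos hm]
    · rw [if_neg hm, if_neg hm]
      push_neg at hm
      have key :
          ([(-1 : Int), 0, 1]).foldl (fun n dr =>
            ([(-1 : Int), 0, 1]).foldl (fun n dc =>
              if dr = 0 ∧ dc = 0 then n
              else n + PySem.List.pyGetD mask ((r + dr) * width + (c + dc)) 0) n) 0
          = PySem.List.pyGetD (PySem.List.pyGetD ((List.range height.toNat).map (fun i =>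
                (List.range (width.toNat + 1)).map (fun j => psum mask ((i : Int) * width) j))) (r - 1) []) (c + 2) 0
            - PySem.List.pyGetD (PySem.List.pyGetD ((List.range height.toNat).map (fun i =>
                (List.range (width.toNat + 1)).map (fun j => psum mask ((i : Int) * width) j))) (r - 1) []) (c - 1) 0
            + PySem.List.pyGetD (PySem.List.pyGetD ((List.range height.toNat).map (fun i =>
                (List.range (width.toNat + 1)).map (fun j => psum mask ((i : Int) * width) j))) r []) (c + 2) 0
            - PySem.List.pyGetD (PySem.List.pyGetD ((List.range height.toNat).map (fun i =>
                (List.range (width.toNat + 1)).map (fun j => psum mask ((i : Int) * width) j))) r []) (c - 1) 0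
            + PySem.List.pyGetD (PySem.List.pyGetD ((List.range height.toNat).map (fun i =>
                (List.range (width.toNat + 1)).map (fun j => psum mask ((i : Int) * width) j))) (r + 1) []) (c + 2) 0
            - PySem.List.pyGetD (PySem.List.pyGetD ((List.range height.toNat).map (fun i =>
                (List.range (width.toNat + 1)).map (fun j => psum mask ((i : Int) * width) j))) (r + 1) []) (c - 1) 0 := by
        rw [pref_get mask width height (r - 1) (by omega) (by omega),
            pref_get mask width height r (by omega) (by omega),
            pref_get mask width height (r + 1) (by omega) (by omega)]
        have t1 := triple mask width (r - 1) c hc.1 hc.2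
        have t2 := triple mask width r c hc.1 hc.2
        have t3 := triple mask width (r + 1) c hc.1 hc.2
        rw [neighA]
        linarith [t1, t2, t3, hm]
      rw [key]
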